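-- pv_equiv track=rewrite | github.com/thedataninja1786/CSES | dynamic_programming/dice_combinations.py | dice_combinations
-- ===== SOURCE A (Python) =====
-- def dice_combinations(t):
--     MOD = (10**9)+7
--
--     dp = [0 for _ in range(t+1)]
--     dp[0] = 1
--
--     for i in range(1,t+1):
--         for j in range(1,7):
--             if i-j >= 0:
--                 dp[i] = (dp[i] + dp[i-j]) % MOD
--
--     return dp[-1]
-- ===== SOURCE B (Python) =====
-- def dice_combinations(t):
--     MOD = 10**9 + 7
--
--     def mat_mul(A, B):
--         return [[sum(A[i][k] * B[k][j] for k in range(6)) % MOD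
--                  for j in range(6)] for i in range(6)]
--
--     def mat_pow(M, e):
--         R = [[1 if i == j else 0 for j in range(6)] for i in range(6)]
--         while e > 0:
--             if e % 2 == 1:
--                 R = mat_mul(R, M)
--             M = mat_mul(M, M)
--             e //= 2
--         return R
--
--     C = [[1, 1, 1, 1, 1, 1],
--          [1, 0, 0, 0, 0, 0],
--          [0, 1, 0, 0, 0, 0],
--          [0, 0, 1, 0, 0, 0],
--          [0, 0, 0, 1, 0, 0],
--          [0, 0, 0, 0, 1, 0]]
--     return mat_pow(C, t)[0][0]
-- ===== Notes on version B (the rewrite author's own statement) =====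
-- stated objective: faster
-- what changed: B replaces A's O(t) dp-table recurrence loop by binary exponentiation of the 6x6 companion matrix of the dice recurrence mod 1e9+7, reading the answer off entry (0,0) of C^t.
import Mathlib
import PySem

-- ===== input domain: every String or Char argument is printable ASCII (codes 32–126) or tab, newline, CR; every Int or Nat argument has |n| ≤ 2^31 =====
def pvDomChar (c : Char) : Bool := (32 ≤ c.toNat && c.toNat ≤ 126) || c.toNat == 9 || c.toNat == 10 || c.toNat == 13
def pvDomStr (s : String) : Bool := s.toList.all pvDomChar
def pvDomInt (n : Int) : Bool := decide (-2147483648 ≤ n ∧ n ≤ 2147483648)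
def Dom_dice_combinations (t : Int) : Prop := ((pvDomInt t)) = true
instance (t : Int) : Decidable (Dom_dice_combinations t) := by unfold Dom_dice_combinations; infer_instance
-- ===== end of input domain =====

-- B replaces A's O(t) dp-table loop by binary exponentiation of the 6x6 companion
-- matrix of the dice recurrence: O(log t) multiplications instead of t table rows.

-- ===== PORT A =====
def dice_combinations (t : Int) : Int :=
  let MOD : Int := 10 ^ 9 + 7
  let dp : List Int := (PySem.List.pyRange 0 (t + 1) 1).map (fun _ => 0)
  let dp := dp.set 0 1
  let dp := (PySem.List.pyRange 1 (t + 1) 1).foldl (fun dp i =>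
      (PySem.List.pyRange 1 7 1).foldl (fun dp j =>
        if i - j ≥ 0 then
          dp.set i.toNat
            (PySem.Int.mod (PySem.List.pyGetD dp i 0 + PySem.List.pyGetD dp (i - j) 0) MOD)
        else dp) dp) dp
  PySem.List.pyGetD dp (-1) 0

-- ===== PORT B =====
-- mat_mul: entrywise comprehension; A[i][k] indices are always in range, so list
-- indexing is ported with getD (exact here).
def pvMatMul (A B : List (List Int)) : List (List Int) :=
  (List.range 6).map (fun i => (List.range 6).map (fun j =>
    PySem.Int.mod
      (((List.range 6).map (fun k => (A.getD i []).getD k 0 * (B.getD k []).getD j 0)).sum)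
      (10 ^ 9 + 7)))

def pvIdMat : List (List Int) :=
  (List.range 6).map (fun i => (List.range 6).map (fun j => if i = j then (1 : Int) else 0))

-- mat_pow's 'while e > 0' loop; the Python loop runs only for e > 0, so the
-- nonnegative exponent is carried as a Nat (e//2 = e/2 there).
def pvMatPowGo (r m : List (List Int)) (e : Nat) : List (List Int) :=
  if e = 0 then r
  else pvMatPowGo (if e % 2 = 1 then pvMatMul r m else r) (pvMatMul m m) (e / 2)
decreasing_by exact Nat.div_lt_self (Nat.pos_of_ne_zero (by assumption)) (by norm_num)

def pvCMat : List (List Int) :=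
  [[1, 1, 1, 1, 1, 1],
   [1, 0, 0, 0, 0, 0],
   [0, 1, 0, 0, 0, 0],
   [0, 0, 1, 0, 0, 0],
   [0, 0, 0, 1, 0, 0],
   [0, 0, 0, 0, 1, 0]]

def dice_combinations_alt (t : Int) : Int :=
  (((pvMatPowGo pvIdMat pvCMat t.toNat).getD 0 []).getD 0 0)

-- ===== PRECONDITION & SPEC =====
-- A raises IndexError (dp[0] = 1 on an empty list) exactly when t < 0.
def Pre_dice_combinations (t : Int) : Prop := 0 ≤ t
instance (t : Int) : Decidable (Pre_dice_combinations t) := by unfold Pre_dice_combinations; infer_instance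
def pvWitness_dice_combinations : Int := 4

def Spec_dice_combinations (t : Int) (out : Int) : Prop := out = dice_combinations_alt t
instance (t : Int) (out : Int) : Decidable (Spec_dice_combinations t out) := by unfold Spec_dice_combinations; infer_instance

-- ===== CLAIM (what is proved, stated in full; the proofs are below) =====
def Claim_equal_dice_combinations : Prop := ∀ (t : Int), Dom_dice_combinations t → Pre_dice_combinations t → Spec_dice_combinations t (dice_combinations t)
-- ===== LEMMAS AND PROOFS =====

-- the common reference sequence: wl n = [w n, w (n-1), …, w 0] where w is the dice
-- recurrence (out-of-range reads default to 0, matching A's guard and the zero pad)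
def nxt (l : List Int) : Int :=
  PySem.Int.mod (l.getD 5 0 + l.getD 4 0 + l.getD 3 0 + l.getD 2 0 + l.getD 1 0 + l.getD 0 0)
    (10 ^ 9 + 7)

def wl : Nat → List Int
  | 0 => [1]
  | n + 1 => nxt (wl n) :: wl n

theorem wl_length (n : Nat) : (wl n).length = n + 1 := by
  induction n with
  | zero => rfl
  | succ n ih => simp [wl, ih]
theorem getD_mid (L R : List Int) (x : Int) : (L ++ x :: R).getD L.length 0 = x := by
  simp [List.getD_eq_getElem?_getD]
theorem getD_left (L R : List Int) (x : Int) (j : Nat) (h : j < L.length) :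
    (L ++ x :: R).getD j 0 = L.getD j 0 := by
  simp [List.getD_eq_getElem?_getD, List.getElem?_append_left h]
theorem set_mid (L R : List Int) (x y : Int) :
    (L ++ x :: R).set L.length y = L ++ y :: R := by
  simp
theorem getD_rev (l : List Int) (j : Nat) (h : j < l.length) :
    l.reverse.getD j 0 = l.getD (l.length - 1 - j) 0 := by
  rw [List.getD_eq_getElem?_getD, List.getD_eq_getElem?_getD, List.getElem?_reverse h]
theorem oneStep (W R : List Int) (x : Int) (i j : Int)
    (hi : i = (W.length : Int)) (h1 : 1 ≤ j) (h2 : j ≤ i) :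
    (if i - j ≥ 0 then
       (W.reverse ++ x :: R).set i.toNat
         (PySem.Int.mod
           (PySem.List.pyGetD (W.reverse ++ x :: R) i 0 +
            PySem.List.pyGetD (W.reverse ++ x :: R) (i - j) 0) (10 ^ 9 + 7))
     else (W.reverse ++ x :: R))
    = W.reverse ++ (PySem.Int.mod (x + W.getD (j - 1).toNat 0) (10 ^ 9 + 7)) :: R := by
  have hWl : W.reverse.length = W.length := by simp
  rw [if_pos (by omega)]
  have hiN : i = ((W.reverse.length : Nat) : Int) := by simp [hi]
  have hij : i - j = (((W.length - j.toNat : Nat)) : Int) := by omega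
  rw [hij, PySem.List.pyGetD_natCast]
  rw [hiN, PySem.List.pyGetD_natCast, getD_mid]
  have hlt : W.length - j.toNat < W.reverse.length := by omega
  rw [getD_left _ _ _ _ hlt, getD_rev _ _ (by omega)]
  have : Int.toNat ((W.reverse.length : Nat) : Int) = W.reverse.length := by omega
  rw [this, set_mid]
  have hidx : W.length - 1 - (W.length - j.toNat) = (j - 1).toNat := by omega
  rw [hidx]

theorem inner_A_0 (m : Nat) :
    (PySem.List.pyRange 1 7 1).foldl (fun dp j =>
        if (((0 : Nat) : Int) + 1) - j ≥ 0 then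
          dp.set (((0 : Nat) : Int) + 1).toNat
            (PySem.Int.mod
              (PySem.List.pyGetD dp (((0 : Nat) : Int) + 1) 0 +
               PySem.List.pyGetD dp ((((0 : Nat) : Int) + 1) - j) 0) (10 ^ 9 + 7))
        else dp)
      ((wl 0).reverse ++ 0 :: List.replicate m 0)
    = (wl (0 + 1)).reverse ++ List.replicate m 0 := by
  have h7 : PySem.List.pyRange 1 7 1 = [1, 2, 3, 4, 5, 6] := by decide
  have hi : (((0 : Nat) : Int) + 1) = ((wl 0).length : Int) := by simp [wl_length]
  rw [h7]
  simp only [List.foldl_cons, List.foldl_nil]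
  rw [oneStep _ _ _ _ 1 hi (by norm_num) (by omega)]
  rw [if_neg (show ¬((((0 : Nat) : Int) + 1) - 2 ≥ 0) by omega)]
  rw [if_neg (show ¬((((0 : Nat) : Int) + 1) - 3 ≥ 0) by omega)]
  rw [if_neg (show ¬((((0 : Nat) : Int) + 1) - 4 ≥ 0) by omega)]
  rw [if_neg (show ¬((((0 : Nat) : Int) + 1) - 5 ≥ 0) by omega)]
  rw [if_neg (show ¬((((0 : Nat) : Int) + 1) - 6 ≥ 0) by omega)]
  simp only [show wl (0 + 1) = nxt (wl 0) :: wl 0 from rfl, List.reverse_cons,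
    List.append_assoc, List.singleton_append]
  congr 2

theorem inner_A_1 (m : Nat) :
    (PySem.List.pyRange 1 7 1).foldl (fun dp j =>
        if (((1 : Nat) : Int) + 1) - j ≥ 0 then
          dp.set (((1 : Nat) : Int) + 1).toNat
            (PySem.Int.mod
              (PySem.List.pyGetD dp (((1 : Nat) : Int) + 1) 0 +
               PySem.List.pyGetD dp ((((1 : Nat) : Int) + 1) - j) 0) (10 ^ 9 + 7))
        else dp)
      ((wl 1).reverse ++ 0 :: List.replicate m 0)
    = (wl (1 + 1)).reverse ++ List.replicate m 0 := by
  have h7 : PySem.List.pyRange 1 7 1 = [1, 2, 3, 4, 5, 6] := by decide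
  have hi : (((1 : Nat) : Int) + 1) = ((wl 1).length : Int) := by simp [wl_length]
  rw [h7]
  simp only [List.foldl_cons, List.foldl_nil]
  rw [oneStep _ _ _ _ 1 hi (by norm_num) (by omega)]
  rw [oneStep _ _ _ _ 2 hi (by norm_num) (by omega)]
  rw [if_neg (show ¬((((1 : Nat) : Int) + 1) - 3 ≥ 0) by omega)]
  rw [if_neg (show ¬((((1 : Nat) : Int) + 1) - 4 ≥ 0) by omega)]
  rw [if_neg (show ¬((((1 : Nat) : Int) + 1) - 5 ≥ 0) by omega)]
  rw [if_neg (show ¬((((1 : Nat) : Int) + 1) - 6 ≥ 0) by omega)]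
  simp only [show wl (1 + 1) = nxt (wl 1) :: wl 1 from rfl, List.reverse_cons,
    List.append_assoc, List.singleton_append]
  congr 2

theorem inner_A_2 (m : Nat) :
    (PySem.List.pyRange 1 7 1).foldl (fun dp j =>
        if (((2 : Nat) : Int) + 1) - j ≥ 0 then
          dp.set (((2 : Nat) : Int) + 1).toNat
            (PySem.Int.mod
              (PySem.List.pyGetD dp (((2 : Nat) : Int) + 1) 0 +
               PySem.List.pyGetD dp ((((2 : Nat) : Int) + 1) - j) 0) (10 ^ 9 + 7))
        else dp)
      ((wl 2).reverse ++ 0 :: List.replicate m 0)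
    = (wl (2 + 1)).reverse ++ List.replicate m 0 := by
  have h7 : PySem.List.pyRange 1 7 1 = [1, 2, 3, 4, 5, 6] := by decide
  have hi : (((2 : Nat) : Int) + 1) = ((wl 2).length : Int) := by simp [wl_length]
  rw [h7]
  simp only [List.foldl_cons, List.foldl_nil]
  rw [oneStep _ _ _ _ 1 hi (by norm_num) (by omega)]
  rw [oneStep _ _ _ _ 2 hi (by norm_num) (by omega)]
  rw [oneStep _ _ _ _ 3 hi (by norm_num) (by omega)]
  rw [if_neg (show ¬((((2 : Nat) : Int) + 1) - 4 ≥ 0) by omega)]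
  rw [if_neg (show ¬((((2 : Nat) : Int) + 1) - 5 ≥ 0) by omega)]
  rw [if_neg (show ¬((((2 : Nat) : Int) + 1) - 6 ≥ 0) by omega)]
  simp only [show wl (2 + 1) = nxt (wl 2) :: wl 2 from rfl, List.reverse_cons,
    List.append_assoc, List.singleton_append]
  congr 2

theorem inner_A_3 (m : Nat) :
    (PySem.List.pyRange 1 7 1).foldl (fun dp j =>
        if (((3 : Nat) : Int) + 1) - j ≥ 0 then
          dp.set (((3 : Nat) : Int) + 1).toNat
            (PySem.Int.mod
              (PySem.List.pyGetD dp (((3 : Nat) : Int) + 1) 0 +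
               PySem.List.pyGetD dp ((((3 : Nat) : Int) + 1) - j) 0) (10 ^ 9 + 7))
        else dp)
      ((wl 3).reverse ++ 0 :: List.replicate m 0)
    = (wl (3 + 1)).reverse ++ List.replicate m 0 := by
  have h7 : PySem.List.pyRange 1 7 1 = [1, 2, 3, 4, 5, 6] := by decide
  have hi : (((3 : Nat) : Int) + 1) = ((wl 3).length : Int) := by simp [wl_length]
  rw [h7]
  simp only [List.foldl_cons, List.foldl_nil]
  rw [oneStep _ _ _ _ 1 hi (by norm_num) (by omega)]
  rw [oneStep _ _ _ _ 2 hi (by norm_num) (by omega)]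
  rw [oneStep _ _ _ _ 3 hi (by norm_num) (by omega)]
  rw [oneStep _ _ _ _ 4 hi (by norm_num) (by omega)]
  rw [if_neg (show ¬((((3 : Nat) : Int) + 1) - 5 ≥ 0) by omega)]
  rw [if_neg (show ¬((((3 : Nat) : Int) + 1) - 6 ≥ 0) by omega)]
  simp only [show wl (3 + 1) = nxt (wl 3) :: wl 3 from rfl, List.reverse_cons,
    List.append_assoc, List.singleton_append]
  congr 2

theorem inner_A_4 (m : Nat) :
    (PySem.List.pyRange 1 7 1).foldl (fun dp j =>
        if (((4 : Nat) : Int) + 1) - j ≥ 0 then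
          dp.set (((4 : Nat) : Int) + 1).toNat
            (PySem.Int.mod
              (PySem.List.pyGetD dp (((4 : Nat) : Int) + 1) 0 +
               PySem.List.pyGetD dp ((((4 : Nat) : Int) + 1) - j) 0) (10 ^ 9 + 7))
        else dp)
      ((wl 4).reverse ++ 0 :: List.replicate m 0)
    = (wl (4 + 1)).reverse ++ List.replicate m 0 := by
  have h7 : PySem.List.pyRange 1 7 1 = [1, 2, 3, 4, 5, 6] := by decide
  have hi : (((4 : Nat) : Int) + 1) = ((wl 4).length : Int) := by simp [wl_length]
  rw [h7]
  simp only [List.foldl_cons, List.foldl_nil]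
  rw [oneStep _ _ _ _ 1 hi (by norm_num) (by omega)]
  rw [oneStep _ _ _ _ 2 hi (by norm_num) (by omega)]
  rw [oneStep _ _ _ _ 3 hi (by norm_num) (by omega)]
  rw [oneStep _ _ _ _ 4 hi (by norm_num) (by omega)]
  rw [oneStep _ _ _ _ 5 hi (by norm_num) (by omega)]
  rw [if_neg (show ¬((((4 : Nat) : Int) + 1) - 6 ≥ 0) by omega)]
  simp only [show wl (4 + 1) = nxt (wl 4) :: wl 4 from rfl, List.reverse_cons,
    List.append_assoc, List.singleton_append]
  congr 2

theorem inner_A_big (K m : Nat) :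
    (PySem.List.pyRange 1 7 1).foldl (fun dp j =>
        if (((K + 5 : Nat) : Int) + 1) - j ≥ 0 then
          dp.set (((K + 5 : Nat) : Int) + 1).toNat
            (PySem.Int.mod
              (PySem.List.pyGetD dp (((K + 5 : Nat) : Int) + 1) 0 +
               PySem.List.pyGetD dp ((((K + 5 : Nat) : Int) + 1) - j) 0) (10 ^ 9 + 7))
        else dp)
      ((wl (K + 5)).reverse ++ 0 :: List.replicate m 0)
    = (wl (K + 5 + 1)).reverse ++ List.replicate m 0 := by
  have h7 : PySem.List.pyRange 1 7 1 = [1, 2, 3, 4, 5, 6] := by decide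
  have hi : (((K + 5 : Nat) : Int) + 1) = ((wl (K + 5)).length : Int) := by
    rw [wl_length]; push_cast; ring
  have hlen : ((wl (K + 5)).length : Int) = ((K + 5 : Nat) : Int) + 1 := hi.symm
  rw [h7]
  simp only [List.foldl_cons, List.foldl_nil]
  rw [oneStep _ _ _ _ 1 hi (by norm_num) (by omega)]
  rw [oneStep _ _ _ _ 2 hi (by norm_num) (by omega)]
  rw [oneStep _ _ _ _ 3 hi (by norm_num) (by omega)]
  rw [oneStep _ _ _ _ 4 hi (by norm_num) (by omega)]
  rw [oneStep _ _ _ _ 5 hi (by norm_num) (by omega)]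
  rw [oneStep _ _ _ _ 6 hi (by norm_num) (by omega)]
  have e1 : ((1 : Int) - 1).toNat = 0 := rfl
  have e2 : ((2 : Int) - 1).toNat = 1 := rfl
  have e3 : ((3 : Int) - 1).toNat = 2 := rfl
  have e4 : ((4 : Int) - 1).toNat = 3 := rfl
  have e5 : ((5 : Int) - 1).toNat = 4 := rfl
  have e6 : ((6 : Int) - 1).toNat = 5 := rfl
  rw [e1, e2, e3, e4, e5, e6]
  rw [show wl (K + 5 + 1) = nxt (wl (K + 5)) :: wl (K + 5) from rfl, List.reverse_cons]
  rw [List.append_assoc]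
  congr 1
  congr 1
  simp only [nxt, PySem.Int.mod_eq_emod_of_pos (by norm_num : (0:Int) < 10 ^ 9 + 7)]
  omega

-- one pass of A's inner loop at i = k+1 computes nxt (wl k)
theorem inner_A (k m : Nat) :
    (PySem.List.pyRange 1 7 1).foldl (fun dp j =>
        if ((k : Int) + 1) - j ≥ 0 then
          dp.set ((k : Int) + 1).toNat
            (PySem.Int.mod
              (PySem.List.pyGetD dp ((k : Int) + 1) 0 +
               PySem.List.pyGetD dp (((k : Int) + 1) - j) 0) (10 ^ 9 + 7))
        else dp)
      ((wl k).reverse ++ 0 :: List.replicate m 0)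
    = (wl (k + 1)).reverse ++ List.replicate m 0 := by
  match k with
  | 0 => exact inner_A_0 m
  | 1 => exact inner_A_1 m
  | 2 => exact inner_A_2 m
  | 3 => exact inner_A_3 m
  | 4 => exact inner_A_4 m
  | (K + 5) => exact inner_A_big K m

-- A's outer loop up to step k yields wl k (reversed) followed by untouched zeros
theorem A_fold (n k : Nat) (hk : k ≤ n) :
    (PySem.List.pyRange 1 ((k : Int) + 1) 1).foldl (fun dp i =>
      (PySem.List.pyRange 1 7 1).foldl (fun dp j =>
        if i - j ≥ 0 then
          dp.set i.toNat
            (PySem.Int.mod (PySem.List.pyGetD dp i 0 + PySem.List.pyGetD dp (i - j) 0)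
              (10 ^ 9 + 7))
        else dp) dp)
      ((1 : Int) :: List.replicate n 0)
    = (wl k).reverse ++ List.replicate (n - k) 0 := by
  induction k with
  | zero =>
      rw [show ((0 : Nat) : Int) + 1 = 1 by norm_num, PySem.List.pyRange_one_eq_nil (le_refl (1 : Int))]
      simp [wl]
  | succ k ih =>
      have hsplit : PySem.List.pyRange 1 (((k + 1 : Nat) : Int) + 1) 1
          = PySem.List.pyRange 1 ((k : Int) + 1) 1 ++ [(k : Int) + 1] := by
        rw [show (((k + 1 : Nat) : Int) + 1) = ((k : Int) + 1) + 1 by push_cast; ring]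
        exact PySem.List.pyRange_one_succ_right (by omega)
      rw [hsplit, List.foldl_append, ih (by omega)]
      simp only [List.foldl_cons, List.foldl_nil]
      rw [show n - k = (n - (k + 1)) + 1 by omega, List.replicate_succ]
      exact inner_A k (n - (k + 1))

-- A's value at a nonnegative t = n is the head of wl n
theorem A_eq_wl (n : Nat) : dice_combinations (n : Int) = (wl n).getD 0 0 := by
  simp only [dice_combinations]
  have hinit : ((PySem.List.pyRange 0 ((n : Int) + 1) 1).map (fun _ => (0 : Int))).set 0 1
      = (1 : Int) :: List.replicate n 0 := by
    rw [List.map_const', PySem.List.length_pyRange_one,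
      show (((n : Int) + 1) - 0).toNat = n + 1 by omega, List.replicate_succ]
    rfl
  rw [hinit, A_fold n n le_rfl, Nat.sub_self, List.replicate_zero, List.append_nil]
  rw [PySem.List.pyGetD_neg_ofNat ((wl n).reverse) 1 0 (by omega)
    (by rw [List.length_reverse, wl_length]; omega)]
  simp [List.getElem_reverse, wl_length, List.getD_eq_getElem?_getD]

-- ========== B side: matrix-exponentiation correctness ==========

-- abstraction of a 6x6 integer matrix into the matrix ring over ZMod (10^9+7)
def toM (A : List (List Int)) : Matrix (Fin 6) (Fin 6) (ZMod 1000000007) :=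
  Matrix.of (fun i j => (((A.getD i.1 []).getD j.1 0 : Int) : ZMod 1000000007))

theorem getD_map_range {α : Type} (f : Nat → α) (d : α) (i : Nat) (h : i < 6) :
    ((List.range 6).map f).getD i d = f i := by
  rw [List.getD_eq_getElem?_getD, List.getElem?_map, List.getElem?_range h]
  rfl

theorem castMod (x : Int) :
    ((PySem.Int.mod x (10 ^ 9 + 7) : Int) : ZMod 1000000007) = (x : ZMod 1000000007) := by
  rw [PySem.Int.mod_eq_emod_of_pos (by norm_num)]
  rw [ZMod.intCast_eq_intCast_iff]
  have : ((1000000007 : Nat) : Int) = 10 ^ 9 + 7 := by norm_num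
  unfold Int.ModEq
  rw [this]
  omega

theorem castEmod (x : Int) :
    ((x % (1000000007 : Int) : Int) : ZMod 1000000007) = (x : ZMod 1000000007) := by
  rw [ZMod.intCast_eq_intCast_iff]
  unfold Int.ModEq
  have : ((1000000007 : Nat) : Int) = 1000000007 := by norm_num
  rw [this]
  omega

theorem mod_range (x : Int) :
    0 ≤ PySem.Int.mod x (10 ^ 9 + 7) ∧ PySem.Int.mod x (10 ^ 9 + 7) < 10 ^ 9 + 7 := by
  rw [PySem.Int.mod_eq_emod_of_pos (by norm_num)]
  constructor
  · exact Int.emod_nonneg x (by norm_num)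
  · exact Int.emod_lt_of_pos x (by norm_num)

theorem toM_mul (A B : List (List Int)) : toM (pvMatMul A B) = toM A * toM B := by
  ext i j
  have hi : i.1 < 6 := i.2
  have hj : j.1 < 6 := j.2
  show (((((pvMatMul A B).getD i.1 []).getD j.1 0 : Int)) : ZMod 1000000007) = _
  rw [pvMatMul, getD_map_range _ _ _ hi, getD_map_range _ _ _ hj, castMod]
  rw [Matrix.mul_apply, Fin.sum_univ_six]
  simp only [List.range_succ, List.range_zero, List.nil_append, List.map_append,
    List.map_cons, List.map_nil, List.sum_append, List.sum_cons, List.sum_nil]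
  push_cast
  simp only [toM, Matrix.of_apply]
  norm_num

theorem toM_id : toM pvIdMat = 1 := by
  ext i j
  have hi : i.1 < 6 := i.2
  have hj : j.1 < 6 := j.2
  show ((((pvIdMat.getD i.1 []).getD j.1 0 : Int)) : ZMod 1000000007) = _
  rw [pvIdMat, getD_map_range _ _ _ hi, getD_map_range _ _ _ hj, Matrix.one_apply]
  by_cases h : i = j
  · rw [if_pos h, if_pos (by rw [h])]; norm_num
  · rw [if_neg h, if_neg (fun hv => h (Fin.ext hv))]; norm_num

theorem toM_powGo (r m : List (List Int)) (e : Nat) :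
    toM (pvMatPowGo r m e) = toM r * (toM m) ^ e := by
  induction e using Nat.strong_induction_on generalizing r m with
  | _ e ih =>
    rw [pvMatPowGo]
    by_cases h : e = 0
    · subst h; simp
    · rw [if_neg h, ih (e / 2) (Nat.div_lt_self (Nat.pos_of_ne_zero h) (by norm_num)), toM_mul]
      have hsplit : e = e % 2 + 2 * (e / 2) := by omega
      by_cases h2 : e % 2 = 1
      · rw [if_pos h2, toM_mul, mul_assoc]
        congr 1
        rw [← pow_two, ← pow_mul]
        conv_rhs => rw [hsplit, h2, pow_add, pow_one]
      · rw [if_neg h2]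
        congr 1
        rw [← pow_two, ← pow_mul]
        conv_rhs => rw [hsplit, show e % 2 = 0 by omega, pow_add, pow_zero, one_mul]

-- the first column of C^n carries the dice sequence: (C^n) i 0 = wl n [i]
theorem col_C (n : Nat) (i : Fin 6) :
    ((toM pvCMat) ^ n) i 0 = (((wl n).getD i.1 0 : Int) : ZMod 1000000007) := by
  induction n generalizing i with
  | zero =>
      rw [pow_zero, Matrix.one_apply]
      fin_cases i <;> simp [wl]
  | succ n ih =>
      rw [pow_succ']
      fin_cases i <;>
      · rw [Matrix.mul_apply, Fin.sum_univ_six]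
        simp only [ih]
        norm_num [toM, Matrix.of_apply, pvCMat, List.getD_eq_getElem?_getD, wl, nxt,
          castMod, castEmod]
        try push_cast
        try ring

-- entry (0,0) of pvMatPowGo's result lies in [0, 10^9+7) whenever the exponent is positive
theorem powGo_entry_range (r m : List (List Int)) (e : Nat) (he : 1 ≤ e) :
    0 ≤ ((pvMatPowGo r m e).getD 0 []).getD 0 0 ∧
      ((pvMatPowGo r m e).getD 0 []).getD 0 0 < 10 ^ 9 + 7 := by
  induction e using Nat.strong_induction_on generalizing r m with
  | _ e ih =>
    rw [pvMatPowGo, if_neg (by omega)]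
    by_cases h1 : e / 2 = 0
    · have he1 : e = 1 := by omega
      subst he1
      have h : pvMatPowGo (pvMatMul r m) (pvMatMul m m) (1 / 2) = pvMatMul r m := by
        rw [pvMatPowGo]
        norm_num
      rw [if_pos (by norm_num : 1 % 2 = 1), h]
      rw [pvMatMul, getD_map_range _ _ _ (by norm_num), getD_map_range _ _ _ (by norm_num)]
      exact mod_range _
    · exact ih (e / 2) (Nat.div_lt_self (by omega) (by norm_num)) _ _ (by omega)

theorem wl_head_range (n : Nat) :
    0 ≤ (wl n).getD 0 0 ∧ (wl n).getD 0 0 < 10 ^ 9 + 7 := by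
  cases n with
  | zero => norm_num [wl]
  | succ n =>
      show 0 ≤ nxt (wl n) ∧ nxt (wl n) < 10 ^ 9 + 7
      exact mod_range _

theorem cast_inj_of_range (a b : Int)
    (ha : 0 ≤ a ∧ a < 10 ^ 9 + 7) (hb : 0 ≤ b ∧ b < 10 ^ 9 + 7)
    (h : (a : ZMod 1000000007) = (b : ZMod 1000000007)) : a = b := by
  rw [ZMod.intCast_eq_intCast_iff] at h
  unfold Int.ModEq at h
  have : ((1000000007 : Nat) : Int) = 10 ^ 9 + 7 := by norm_num
  rw [this] at h
  omega

-- B's value at a nonnegative t = n is also the head of wl n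
theorem B_eq_wl (n : Nat) : dice_combinations_alt (n : Int) = (wl n).getD 0 0 := by
  have hid : pvMatPowGo pvIdMat pvCMat 0 = pvIdMat := by rw [pvMatPowGo]; norm_num
  cases n with
  | zero =>
      show ((pvMatPowGo pvIdMat pvCMat (Int.toNat ((0 : Nat) : Int))).getD 0 []).getD 0 0
        = (wl 0).getD 0 0
      rw [show Int.toNat ((0 : Nat) : Int) = 0 from rfl, hid]
      rfl
  | succ n =>
      apply cast_inj_of_range _ _
        (by simpa [dice_combinations_alt, Int.toNat_natCast] using
          powGo_entry_range pvIdMat pvCMat (n + 1) (by omega))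
        (wl_head_range (n + 1))
      have h0 : dice_combinations_alt ((n + 1 : Nat) : Int)
          = ((pvMatPowGo pvIdMat pvCMat (n + 1)).getD 0 []).getD 0 0 := by
        simp [dice_combinations_alt]
      rw [h0]
      have : ((((pvMatPowGo pvIdMat pvCMat (n + 1)).getD 0 []).getD 0 0 : Int)
          : ZMod 1000000007) = toM (pvMatPowGo pvIdMat pvCMat (n + 1)) 0 0 := rfl
      rw [this, toM_powGo, toM_id, one_mul, col_C (n + 1) 0]
      rfl

-- ===== VERDICT (by name: the statement is the Claim_ definition above) =====
theorem dice_combinations_spec : Claim_equal_dice_combinations := by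
  intro t _ hpre
  show dice_combinations t = dice_combinations_alt t
  obtain ⟨n, rfl⟩ : ∃ n : Nat, t = (n : Int) := ⟨t.toNat, (Int.toNat_of_nonneg hpre).symm⟩
  rw [A_eq_wl n, B_eq_wl n]
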